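-- pv_equiv track=rewrite | github.com/Kipngetich33/Rainfall-App | RainfallProject/rainfallapp/methods.py | assign_colors
-- ===== SOURCE A (Python) =====
-- def assign_colors(data):
--     chosen_colors = []
--     background_colors =['rgba(255, 99, 132, 0.2)',
--                 'rgba(54, 162, 235, 0.2)',
--                 'rgba(255, 206, 86, 0.2)',
--                 'rgba(75, 192, 192, 0.2)',
--                 'rgba(153, 102, 255, 0.2)',
--                 'rgba(255, 159, 64, 0.2)'
--     ]
--     for i in range(0,data):
--         position = i % 6
--         chosen_colors.append(background_colors[position])
--     return chosen_colors
-- ===== SOURCE B (Python) =====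
-- def assign_colors(data):
--     background_colors = ['rgba(255, 99, 132, 0.2)',
--                 'rgba(54, 162, 235, 0.2)',
--                 'rgba(255, 206, 86, 0.2)',
--                 'rgba(75, 192, 192, 0.2)',
--                 'rgba(153, 102, 255, 0.2)',
--                 'rgba(255, 159, 64, 0.2)'
--     ]
--     return (background_colors * (data // 6 + 1))[:data]
-- ===== Notes on version B (the rewrite author's own statement) =====
-- stated objective: simpler
-- what changed: Replaces the per-index loop with modular indexing by a replicate-and-truncate construction: build background_colors * (data // 6 + 1) and slice [:data].
import Mathlib
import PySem

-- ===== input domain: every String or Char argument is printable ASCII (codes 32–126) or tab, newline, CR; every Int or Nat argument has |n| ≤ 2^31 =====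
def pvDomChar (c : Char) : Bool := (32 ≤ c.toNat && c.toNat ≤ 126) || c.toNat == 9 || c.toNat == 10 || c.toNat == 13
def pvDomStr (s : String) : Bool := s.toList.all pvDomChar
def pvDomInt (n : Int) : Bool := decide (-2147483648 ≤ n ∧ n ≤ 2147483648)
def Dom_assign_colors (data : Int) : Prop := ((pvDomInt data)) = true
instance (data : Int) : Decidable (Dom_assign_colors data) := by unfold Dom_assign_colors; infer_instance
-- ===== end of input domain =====

-- B replaces A's index loop with modular indexing by a replicate-and-truncate construction (simpler decomposition).

-- ===== PORT A =====
def assign_colors (data : Int) : List String :=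
  let background_colors : List String :=
    ["rgba(255, 99, 132, 0.2)",
     "rgba(54, 162, 235, 0.2)",
     "rgba(255, 206, 86, 0.2)",
     "rgba(75, 192, 192, 0.2)",
     "rgba(153, 102, 255, 0.2)",
     "rgba(255, 159, 64, 0.2)"]
  (PySem.List.pyRange 0 data 1).foldl
    (fun chosen_colors i =>
      chosen_colors ++ [PySem.List.pyGetD background_colors (PySem.Int.mod i 6) ""]) []
    -- pyGetD is exact here: 0 ≤ i % 6 < 6 = len(background_colors), so Python never raises

-- ===== PORT B =====
def assign_colors_alt (data : Int) : List String :=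
  let background_colors : List String :=
    ["rgba(255, 99, 132, 0.2)",
     "rgba(54, 162, 235, 0.2)",
     "rgba(255, 206, 86, 0.2)",
     "rgba(75, 192, 192, 0.2)",
     "rgba(153, 102, 255, 0.2)",
     "rgba(255, 159, 64, 0.2)"]
  PySem.List.slice
    (List.flatten (List.replicate (PySem.Int.floordiv data 6 + 1).toNat background_colors))
    none (some data)
    -- List.replicate k l |>.flatten is Python's  l * k  (k ≤ 0 gives [], matching toNat)

-- ===== PRECONDITION & SPEC =====
def Spec_assign_colors (data : Int) (out : List String) : Prop := out = assign_colors_alt data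
instance (data : Int) (out : List String) : Decidable (Spec_assign_colors data out) := by unfold Spec_assign_colors; infer_instance

-- ===== CLAIM (what is proved, stated in full; the proofs are below) =====
def Claim_equal_assign_colors : Prop := ∀ (data : Int), Dom_assign_colors data → Spec_assign_colors data (assign_colors data)

-- ===== LEMMAS AND PROOFS =====

-- element i of K copies of a 6-element list is element i % 6 of the list
lemma pv_flatten_replicate_getD (l : List String) (hl : l.length = 6)
    (K i : Nat) (hi : i < 6 * K) :
    (List.flatten (List.replicate K l)).getD i "" = l.getD (i % 6) "" := by
  induction K generalizing i with
  | zero => omega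
  | succ k ih =>
    rw [List.replicate_succ, List.flatten_cons]
    by_cases h6 : i < 6
    · have hlt : i < l.length := by rw [hl]; omega
      rw [List.getD_append _ _ _ _ hlt, Nat.mod_eq_of_lt h6]
    · have h6' : l.length ≤ i := by rw [hl]; omega
      rw [List.getD_append_right _ _ _ _ h6', hl,
          ih (i - 6) (by omega), (by omega : (i - 6) % 6 = i % 6)]

-- the index loop and the replicate-and-truncate construction agree for any 6-element palette
lemma pv_cycle (l : List String) (hl : l.length = 6) (data : Int) :
    (PySem.List.pyRange 0 data 1).foldl
      (fun chosen i => chosen ++ [PySem.List.pyGetD l (PySem.Int.mod i 6) ""]) [] =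
    PySem.List.slice
      (List.flatten (List.replicate (PySem.Int.floordiv data 6 + 1).toNat l))
      none (some data) := by
  rcases lt_or_ge data 0 with hneg | hpos
  · -- negative: the loop is empty and data // 6 + 1 ≤ 0, so both sides are []
    rw [PySem.List.pyRange_one_eq_nil (by omega)]
    have h1 : data / 6 < 0 := by omega
    simp [PySem.List.slice]
    exact Or.inr (fun h => absurd h (by omega))
  · -- nonnegative: both sides are the first data elements of the cycled list
    rw [PySem.List.foldl_append_singleton_eq_map, PySem.List.pyRange_one,
        PySem.List.slice_to _ hpos]
    have hfd : PySem.Int.floordiv data 6 = data / 6 :=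
      PySem.Int.floordiv_eq_ediv_of_pos (by omega)
    set n : Nat := data.toNat with hn
    have hdata : data = (n : Int) := by omega
    set K : Nat := (PySem.Int.floordiv data 6 + 1).toNat with hK
    have hK' : K = (data / 6 + 1).toNat := by rw [hK, hfd]
    have hnK : n < 6 * K := by omega
    apply List.ext_getElem
    · simp [hl, Nat.mul_comm]; omega
    · intro i h1 h2
      have hi : i < n := by simp at h1; omega
      have hgd := pv_flatten_replicate_getD l hl K i (by omega)
      have hmod : PySem.Int.mod (0 + (i : Int)) 6 = ((i % 6 : Nat) : Int) := by
        rw [zero_add]; exact_mod_cast PySem.Int.mod_natCast i 6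
      simp only [List.nil_append, List.getElem_map, List.getElem_range, List.getElem_take]
      rw [hmod, PySem.List.pyGetD_natCast, ← List.getD_eq_getElem _ ""]
      exact hgd.symm

-- ===== VERDICT (by name: the statement is the Claim_ definition above) =====
theorem assign_colors_spec : Claim_equal_assign_colors := by
  intro data _
  unfold Spec_assign_colors assign_colors assign_colors_alt
  exact pv_cycle _ rfl data
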